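-- pv_equiv track=rewrite | github.com/whoagin/zooobot | config.py | recommendation_animal
-- ===== SOURCE A (Python) =====
-- def recommendation_animal(user_option: list,
--                           animal_option: dict):  # исходя из ответов подбирает животное для пользователя
--     recommendations = []
--     max_matches = 0
--
--     for animal, traits in animal_option.items():
--         # Подсчёт совпадений
--         matches = sum(1 for trait in traits if trait in user_option)
--
--         if matches > max_matches:
--             # Обновляем максимум совпадений и перезаписываем рекомендации
--             max_matches = matches
--             recommendations = [animal]
--         elif matches == max_matches and max_matches > 0:
--             # Добавляем животное с таким же количеством совпадений
--             recommendations = [animal]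
--
--     # Если совпадений не было вовсе
--     if not recommendations:
--         return ['Для вас нет подходящего зверька :(']
--
--     return recommendations
-- ===== SOURCE B (Python) =====
-- def recommendation_animal(user_option: list,
--                           animal_option: dict):
--     # B: separate counting from selection — build the full count table, take its max,
--     # then pick the last animal attaining it by scanning the table in reverse.
--     counts = [(animal, sum(1 for trait in traits if trait in user_option))
--               for animal, traits in animal_option.items()]
--     best = max((c for _, c in counts), default=0)
--     if best == 0:
--         return ['Для вас нет подходящего зверька :(']
--     for animal, c in reversed(counts):
--         if c == best:
--             return [animal]
-- ===== Notes on version B (the rewrite author's own statement) =====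
-- stated objective: alternative
-- what changed: A keeps a running maximum and rewrites a one-element recommendation list inside a single pass; B first materialises the full (animal, match-count) table, computes the maximum count, and then selects the last animal attaining it by a reverse scan of the table.
import Mathlib
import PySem

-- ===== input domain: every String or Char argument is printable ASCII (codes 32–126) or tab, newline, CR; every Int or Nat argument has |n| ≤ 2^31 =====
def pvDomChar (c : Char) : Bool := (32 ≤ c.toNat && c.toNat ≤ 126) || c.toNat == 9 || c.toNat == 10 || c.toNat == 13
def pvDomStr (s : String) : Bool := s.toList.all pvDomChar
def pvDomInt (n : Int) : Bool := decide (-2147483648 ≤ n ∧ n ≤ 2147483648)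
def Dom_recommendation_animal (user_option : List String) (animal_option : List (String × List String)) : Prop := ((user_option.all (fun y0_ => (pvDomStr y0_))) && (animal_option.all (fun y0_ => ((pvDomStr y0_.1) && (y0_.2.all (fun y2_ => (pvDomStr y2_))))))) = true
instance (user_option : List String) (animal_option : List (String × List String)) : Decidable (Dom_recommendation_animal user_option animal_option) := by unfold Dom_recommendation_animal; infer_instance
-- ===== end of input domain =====

-- B separates counting (a full (animal, match-count) table) from selection (max + reverse scan
-- for the last animal attaining it); same results as A's single running-max pass.


-- ===== PORT A =====
-- sum(1 for trait in traits if trait in user_option)  (shared verbatim by both Pythons)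
def pvMatchCount (user_option : List String) (traits : List String) : Int :=
  (traits.map (fun trait => if trait ∈ user_option then (1 : Int) else 0)).sum

def recommendation_animal (user_option : List String) (animal_option : List (String × List String)) : List String :=
  let st := (PySem.Dict.ofList animal_option).items.foldl
    (fun (st : List String × Int) p =>
      let mts := pvMatchCount user_option p.2
      if mts > st.2 then ([p.1], mts)
      else if mts = st.2 ∧ st.2 > 0 then ([p.1], st.2)
      else st)
    ([], 0)
  if st.1 = [] then ["Для вас нет подходящего зверька :("] else st.1

-- ===== PORT B =====
def recommendation_animal_alt (user_option : List String) (animal_option : List (String × List String)) : List String :=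
  let counts := (PySem.Dict.ofList animal_option).items.map
    (fun p => (p.1, pvMatchCount user_option p.2))
  let best := PySem.List.maxD (counts.map (fun p => p.2)) (fun c => c) 0
  if best = 0 then ["Для вас нет подходящего зверька :("]
  else
    match counts.reverse.find? (fun p => p.2 == best) with
    | some p => [p.1]
    | none => []  -- unreachable: best > 0 is attained by some table row

-- ===== PRECONDITION & SPEC =====
def Spec_recommendation_animal (user_option : List String) (animal_option : List (String × List String)) (out : List String) : Prop := out = recommendation_animal_alt user_option animal_option
instance (user_option : List String) (animal_option : List (String × List String)) (out : List String) : Decidable (Spec_recommendation_animal user_option animal_option out) := by unfold Spec_recommendation_animal; infer_instance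

-- ===== CLAIM (what is proved, stated in full; the proofs are below) =====
def Claim_equal_recommendation_animal : Prop := ∀ (user_option : List String) (animal_option : List (String × List String)), Dom_recommendation_animal user_option animal_option → Spec_recommendation_animal user_option animal_option (recommendation_animal user_option animal_option)

-- ===== LEMMAS AND PROOFS =====

-- the best match count over a row list, and A's selection characterised over it
def pvBest (uo : List String) (l : List (String × List String)) : Int :=
  l.foldl (fun m p => max m (pvMatchCount uo p.2)) 0

def pvSel (uo : List String) (l : List (String × List String)) : List String :=
  if pvBest uo l = 0 then []
  else
    match l.reverse.find? (fun p => pvMatchCount uo p.2 == pvBest uo l) with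
    | some p => [p.1]
    | none => []

theorem pvMatchCount_nonneg (uo ts : List String) : 0 ≤ pvMatchCount uo ts := by
  apply List.sum_nonneg
  intro x hx
  simp only [List.mem_map] at hx
  obtain ⟨t, -, rfl⟩ := hx
  split <;> norm_num

theorem pvBest_nonneg (uo : List String) (l : List (String × List String)) : 0 ≤ pvBest uo l :=
  (PySem.List.le_foldl_max_int l (fun p => pvMatchCount uo p.2) 0).1

theorem pvLoopA_eq (uo : List String) (l : List (String × List String)) :
    l.foldl
      (fun (st : List String × Int) p =>
        let mts := pvMatchCount uo p.2
        if mts > st.2 then ([p.1], mts)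
        else if mts = st.2 ∧ st.2 > 0 then ([p.1], st.2)
        else st)
      ([], 0) = (pvSel uo l, pvBest uo l) := by
  induction l using List.reverseRecOn with
  | nil => simp [pvSel, pvBest]
  | append_singleton l x ih =>
    have hc : 0 ≤ pvMatchCount uo x.2 := pvMatchCount_nonneg uo x.2
    have hb : 0 ≤ pvBest uo l := pvBest_nonneg uo l
    have hB : pvBest uo (l ++ [x]) = max (pvBest uo l) (pvMatchCount uo x.2) := by
      simp [pvBest, List.foldl_append]
    rw [List.foldl_append, ih]
    simp only [List.foldl_cons, List.foldl_nil]
    by_cases h1 : pvMatchCount uo x.2 > pvBest uo l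
    · have hmax : max (pvBest uo l) (pvMatchCount uo x.2) = pvMatchCount uo x.2 := by omega
      have hne : pvMatchCount uo x.2 ≠ 0 := by omega
      simp only [h1, if_pos]
      rw [Prod.mk.injEq]
      constructor
      · simp [pvSel, hB, hmax, hne, List.find?_cons_of_pos]
      · rw [hB, hmax]
    · by_cases h2 : pvMatchCount uo x.2 = pvBest uo l ∧ pvBest uo l > 0
      · have hmax : max (pvBest uo l) (pvMatchCount uo x.2) = pvBest uo l := by omega
        have hne : pvBest uo l ≠ 0 := by omega
        simp only [h2]
        rw [Prod.mk.injEq]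
        constructor
        · simp [pvSel, hB, hne, List.find?_cons_of_pos, h2.1]
        · rw [hB, hmax]; simp
      · by_cases h0 : pvBest uo l = 0
        · have hc0 : pvMatchCount uo x.2 = 0 := by omega
          have hmax : max (pvBest uo l) (pvMatchCount uo x.2) = 0 := by omega
          simp only [h1, h2, if_false]
          rw [Prod.mk.injEq]
          constructor
          · simp [pvSel, hB, h0, hc0]
          · rw [hB, hmax, h0]
        · have hlt : pvMatchCount uo x.2 ≠ pvBest uo l := by
            intro h; exact h2 ⟨h, by omega⟩
          have hmax : max (pvBest uo l) (pvMatchCount uo x.2) = pvBest uo l := by omega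
          simp only [h1, h2, if_false]
          rw [Prod.mk.injEq]
          constructor
          · rw [pvSel, pvSel, hB, hmax]
            simp only [if_neg h0, List.reverse_append, List.reverse_singleton,
              List.singleton_append]
            rw [List.find?_cons_of_neg]
            simp [hlt]
          · rw [hB, hmax]

theorem pvBest_attained (uo : List String) (l : List (String × List String))
    (h : pvBest uo l ≠ 0) : ∃ p ∈ l, pvMatchCount uo p.2 = pvBest uo l := by
  have hfold : pvBest uo l = (l.map (fun p => pvMatchCount uo p.2)).foldl max 0 := by
    rw [List.foldl_map]; rfl
  rcases PySem.List.foldl_max_mem (l.map (fun p => pvMatchCount uo p.2)) 0 with h0 | hm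
  · exact absurd (hfold.trans h0) h
  · rw [← hfold] at hm
    simp only [List.mem_map] at hm
    obtain ⟨p, hp, hpe⟩ := hm
    exact ⟨p, hp, hpe⟩

theorem pvBestB_eq (uo : List String) (l : List (String × List String)) :
    PySem.List.maxD ((l.map (fun p => (p.1, pvMatchCount uo p.2))).map (fun p => p.2)) (fun c => c) 0
      = pvBest uo l := by
  have h : (l.map (fun p => (p.1, pvMatchCount uo p.2))).map (fun p => p.2)
      = l.map (fun p => pvMatchCount uo p.2) := by simp
  rw [h]
  cases l with
  | nil => simp [PySem.List.maxD, PySem.List.max?, pvBest]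
  | cons p t =>
    rw [List.map_cons, PySem.List.maxD, PySem.List.max?_id_cons, Option.getD_some,
        List.foldl_map, pvBest, List.foldl_cons, max_eq_right (pvMatchCount_nonneg uo p.2)]

-- ===== VERDICT (by name: the statement is the Claim_ definition above) =====
theorem recommendation_animal_spec : Claim_equal_recommendation_animal := by
  intro uo ao _
  unfold Spec_recommendation_animal recommendation_animal recommendation_animal_alt
  set l := (PySem.Dict.ofList ao).items with hl
  rw [pvLoopA_eq]
  dsimp only
  rw [pvBestB_eq]
  by_cases h0 : pvBest uo l = 0
  · simp [pvSel, h0]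
  · rw [if_neg h0]
    have hsel : pvSel uo l =
        match l.reverse.find? (fun p => pvMatchCount uo p.2 == pvBest uo l) with
        | some p => [p.1] | none => [] := by
      rw [pvSel, if_neg h0]
    rw [← List.map_reverse, List.find?_map]
    have hcomp : ((fun p : String × Int => p.2 == pvBest uo l) ∘
        (fun p : String × List String => (p.1, pvMatchCount uo p.2)))
        = fun p : String × List String => pvMatchCount uo p.2 == pvBest uo l := rfl
    rw [hcomp]
    cases hf : l.reverse.find? (fun p => pvMatchCount uo p.2 == pvBest uo l) with
    | none =>
      exfalso
      obtain ⟨p, hp, hpe⟩ := pvBest_attained uo l h0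
      have := List.find?_eq_none.mp hf p (by simpa using hp)
      simp [hpe] at this
    | some q =>
      rw [hsel, hf]
      simp
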